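-- pv_equiv track=rewrite | github.com/Agentic-Environmental-Engineering/GymVerse | gem/gem/envs/example/game_BattleStamina_MaxSubarraySumEnv_GEM_env.py | _compute_min_stamina
-- ===== SOURCE A (Python) =====
-- def _compute_min_stamina(waves, regen, shields):
--     def need_for_sequence(seq, r):
--         max_pref = 0
--         s = 0
--         for d in seq:
--             s += (d - r)
--             if s > max_pref:
--                 max_pref = s
--         return max(0, max_pref)
--
--     base_need = need_for_sequence(waves, regen)
--     if shields <= 0:
--         return base_need
--     # Implement for shields=1 only; if shields>1 due to config, cap at 1 to keep solvable and aligned with rules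
--     S = 1 if shields >= 1 else 0
--     if S == 0:
--         return base_need
--     best = base_need
--     # Try nullifying each wave and compute minimal need
--     for j in range(len(waves)):
--         modified = waves[:]
--         modified[j] = 0
--         candidate = need_for_sequence(modified, regen)
--         if candidate < best:
--             best = candidate
--     return best
-- ===== SOURCE B (Python) =====
-- def _compute_min_stamina(waves, regen, shields):
--     # O(n): prefix sums + prefix-max / suffix-max arrays; each "nullify wave j"
--     # candidate is computed in O(1) instead of re-scanning the whole list.
--     pref = [0]
--     for d in waves:
--         pref.append(pref[-1] + d - regen)
--     # L[j] = max(pref[0..j])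
--     L = []
--     m = None
--     for p in pref:
--         m = p if m is None or p > m else m
--         L.append(m)
--     # R[j] = max(pref[j..n])
--     R = []
--     m = None
--     for p in reversed(pref):
--         m = p if m is None or p > m else m
--         R.append(m)
--     R.reverse()
--     base = max(0, L[-1])
--     if shields <= 0:
--         return base
--     best = base
--     for w, l, r2 in zip(waves, L, R[1:]):
--         cand = max(0, l, r2 - w)
--         if cand < best:
--             best = cand
--     return best
-- ===== Notes on version B (the rewrite author's own statement) =====
-- stated objective: faster
-- what changed: A recomputes the prefix-sum peak from scratch for every nullified wave (O(n^2)); B builds prefix sums plus prefix-max and suffix-max arrays once and evaluates each nullification candidate in O(1).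
import Mathlib
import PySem

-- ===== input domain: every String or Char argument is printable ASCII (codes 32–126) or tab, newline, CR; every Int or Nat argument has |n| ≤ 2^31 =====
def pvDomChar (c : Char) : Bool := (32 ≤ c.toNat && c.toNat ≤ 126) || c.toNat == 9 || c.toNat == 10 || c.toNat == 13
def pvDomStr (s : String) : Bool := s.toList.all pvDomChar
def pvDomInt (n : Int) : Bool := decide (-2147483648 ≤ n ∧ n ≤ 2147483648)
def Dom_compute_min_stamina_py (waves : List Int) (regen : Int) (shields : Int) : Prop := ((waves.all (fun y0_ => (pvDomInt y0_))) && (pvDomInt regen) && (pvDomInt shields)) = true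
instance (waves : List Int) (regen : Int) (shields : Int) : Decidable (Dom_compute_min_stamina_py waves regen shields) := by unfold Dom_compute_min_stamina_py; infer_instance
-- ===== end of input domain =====

-- B replaces A's quadratic "re-scan the whole list for each nullified wave" by one pass of
-- prefix sums with prefix-max and suffix-max arrays, computing each candidate in O(1).


-- ===== PORT A =====
-- inner loop of need_for_sequence: state (max_pref, s)
def nfsLoopA : List Int → Int → Int → Int → Int
  | [], _, mp, _ => mp
  | d :: t, r, mp, s =>
      let s' := s + (d - r)
      nfsLoopA t r (if s' > mp then s' else mp) s'

def needForSequence (seq : List Int) (r : Int) : Int :=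
  max 0 (nfsLoopA seq r 0 0)

def compute_min_stamina_py (waves : List Int) (regen : Int) (shields : Int) : Int :=
  let base_need := needForSequence waves regen
  if shields ≤ 0 then base_need
  else
    let S : Int := if shields ≥ 1 then 1 else 0
    if S = 0 then base_need
    else
      (PySem.List.pyRange 0 waves.length 1).foldl
        (fun best j =>
          let modified := PySem.List.pySetD waves j 0
          let candidate := needForSequence modified regen
          if candidate < best then candidate else best) base_need

-- ===== PORT B =====
-- pref = [0]; for d in waves: pref.append(pref[-1] + d - regen)
def scanSums : List Int → Int → Int → List Int
  | [], _, s => [s]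
  | d :: t, r, s => s :: scanSums t r (s + d - r)

-- running maximum (m gets initialised by the first iteration's "m is None" branch)
def scanMax : List Int → Int → List Int
  | [], _ => []
  | p :: t, m => let m' := if p > m then p else m; m' :: scanMax t m'

def prefMax : List Int → List Int
  | [] => []
  | p :: t => p :: scanMax t p

def compute_min_stamina_py_alt (waves : List Int) (regen : Int) (shields : Int) : Int :=
  let pref := scanSums waves regen 0
  let L := prefMax pref
  let R := (prefMax pref.reverse).reverse
  let base := max 0 (L.getLastD 0)     -- L[-1]; L is nonempty
  if shields ≤ 0 then base
  else
    (waves.zip (L.zip (R.drop 1))).foldl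
      (fun best wlr =>
        let cand := max (max 0 wlr.2.1) (wlr.2.2 - wlr.1)   -- max(0, l, r2 - w)
        if cand < best then cand else best) base

-- ===== PRECONDITION & SPEC =====
def Spec_compute_min_stamina_py (waves : List Int) (regen : Int) (shields : Int) (out : Int) : Prop := out = compute_min_stamina_py_alt waves regen shields
instance (waves : List Int) (regen : Int) (shields : Int) (out : Int) : Decidable (Spec_compute_min_stamina_py waves regen shields out) := by unfold Spec_compute_min_stamina_py; infer_instance

-- ===== CLAIM (what is proved, stated in full; the proofs are below) =====
def Claim_equal_compute_min_stamina_py : Prop := ∀ (waves : List Int) (regen : Int) (shields : Int), Dom_compute_min_stamina_py waves regen shields → Spec_compute_min_stamina_py waves regen shields (compute_min_stamina_py waves regen shields)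

-- ===== LEMMAS AND PROOFS =====

-- prefix sums of (d - r), without the leading 0
def ps : List Int → Int → Int → List Int
  | [], _, _ => []
  | d :: t, r, s => (s + (d - r)) :: ps t r (s + (d - r))

-- final running sum
def shft : List Int → Int → Int → Int
  | [], _, s => s
  | d :: t, r, s => shft t r (s + (d - r))

-- maximum of a nonempty list (0 for [])
def Mne : List Int → Int
  | [] => 0
  | x :: t => t.foldl max x

theorem if_gt_eq_max (m x : Int) : (if x > m then x else m) = max m x := by
  rcases lt_trichotomy m x with h | h | h <;> simp [max_def] <;> omega

theorem ps_length (ws : List Int) (r : Int) : ∀ s, (ps ws r s).length = ws.length := by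
  induction ws with
  | nil => intro s; rfl
  | cons d t ih => intro s; simp [ps, ih]

theorem nfsLoopA_eq (seq : List Int) (r : Int) : ∀ mp s, nfsLoopA seq r mp s = (ps seq r s).foldl max mp := by
  induction seq with
  | nil => intro mp s; rfl
  | cons d t ih =>
      intro mp s
      simp only [nfsLoopA, ps, List.foldl_cons]
      rw [ih, if_gt_eq_max]

theorem scanSums_eq (ws : List Int) (r : Int) : ∀ s, scanSums ws r s = s :: ps ws r s := by
  induction ws with
  | nil => intro s; rfl
  | cons d t ih =>
      intro s
      have h : s + d - r = s + (d - r) := by ring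
      simp only [scanSums, ps, ih, h]

theorem ps_append (u v : List Int) (r : Int) : ∀ s, ps (u ++ v) r s = ps u r s ++ ps v r (shft u r s) := by
  induction u with
  | nil => intro s; rfl
  | cons d t ih => intro s; simp only [List.cons_append, ps, shft, ih]

theorem ps_shift (ws : List Int) (r c : Int) : ∀ s, ps ws r (s + c) = (ps ws r s).map (· + c) := by
  induction ws with
  | nil => intro s; rfl
  | cons d t ih =>
      intro s
      have h : s + c + (d - r) = s + (d - r) + c := by ring
      simp only [ps, List.map_cons, h, ih]

theorem foldl_max_map_add (l : List Int) (c : Int) : ∀ a, (l.map (· + c)).foldl max (a + c) = l.foldl max a + c := by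
  induction l with
  | nil => intro a; rfl
  | cons x t ih =>
      intro a
      simp only [List.map_cons, List.foldl_cons]
      rw [max_add_add_right]
      exact ih (max a x)

theorem foldl_max_assoc (l : List Int) : ∀ a b, l.foldl max (max a b) = max a (l.foldl max b) := by
  induction l with
  | nil => intro a b; rfl
  | cons x t ih =>
      intro a b
      simp only [List.foldl_cons, max_assoc, ih]

theorem foldl_max_eq_Mne (x : Int) (t : List Int) (a : Int) : (x :: t).foldl max a = max a (Mne (x :: t)) := by
  simp only [List.foldl_cons, Mne]
  rw [← foldl_max_assoc]

theorem Mne_map_add (x : Int) (t : List Int) (c : Int) : Mne ((x :: t).map (· + c)) = Mne (x :: t) + c := by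
  simp only [List.map_cons, Mne]
  exact foldl_max_map_add t c x

theorem scanMax_getD (t : List Int) : ∀ (m : Int) (j : Nat), j < t.length → (scanMax t m).getD j 0 = (t.take (j+1)).foldl max m := by
  induction t with
  | nil => intro m j h; simp at h
  | cons x t' ih =>
      intro m j h
      cases j with
      | zero => simp [scanMax, if_gt_eq_max]
      | succ j' =>
          simp only [scanMax, if_gt_eq_max, List.getD_cons_succ, List.take_succ_cons, List.foldl_cons]
          exact ih (max m x) j' (by simpa using h)

theorem prefMax_getD (l : List Int) (j : Nat) (h : j < l.length) : (prefMax l).getD j 0 = Mne (l.take (j+1)) := by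
  cases l with
  | nil => simp at h
  | cons p t =>
      cases j with
      | zero => simp [prefMax, Mne]
      | succ j' =>
          simp only [prefMax, List.getD_cons_succ, List.take_succ_cons]
          rw [scanMax_getD t p j' (by simpa using h)]
          simp [Mne]

theorem scanMax_getLastD (t : List Int) : ∀ m, (scanMax t m).getLastD m = t.foldl max m := by
  induction t with
  | nil => intro m; rfl
  | cons x t' ih =>
      intro m
      simp only [scanMax, if_gt_eq_max, List.getLastD_cons, List.foldl_cons]
      exact ih (max m x)

theorem prefMax_getLastD (l : List Int) (h : l ≠ []) : (prefMax l).getLastD 0 = Mne l := by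
  cases l with
  | nil => exact absurd rfl h
  | cons p t =>
      simp only [prefMax, List.getLastD_cons, Mne]
      exact scanMax_getLastD t p

theorem scanMax_length (t : List Int) : ∀ m, (scanMax t m).length = t.length := by
  induction t with
  | nil => intro m; rfl
  | cons x t' ih => intro m; simp [scanMax, ih]

theorem prefMax_length (l : List Int) : (prefMax l).length = l.length := by
  cases l with
  | nil => rfl
  | cons p t => simp [prefMax, scanMax_length]

theorem Mne_spec (l : List Int) (h : l ≠ []) : Mne l ∈ l ∧ ∀ y ∈ l, y ≤ Mne l := by
  cases l with
  | nil => exact absurd rfl h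
  | cons x t =>
      constructor
      · rcases PySem.List.foldl_max_mem t x with h1 | h1
        · rw [Mne, h1]; exact List.mem_cons_self
        · exact List.mem_cons_of_mem x h1
      · intro y hy
        rcases List.mem_cons.mp hy with rfl | hy
        · exact (PySem.List.le_foldl_max t y).1
        · exact (PySem.List.le_foldl_max t x).2 y hy

theorem Mne_reverse (l : List Int) (h : l ≠ []) : Mne l.reverse = Mne l := by
  have h' : l.reverse ≠ [] := by simpa using h
  obtain ⟨m1, u1⟩ := Mne_spec l.reverse h'
  obtain ⟨m2, u2⟩ := Mne_spec l h
  exact le_antisymm (u2 _ (List.mem_reverse.mp m1)) (u1 _ (List.mem_reverse.mpr m2))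

-- A's candidate for nullifying the wave at position u.length equals B's O(1) formula.
theorem cand_eq (u : List Int) (w : Int) (v : List Int) (r : Int) :
    max 0 (nfsLoopA (u ++ 0 :: v) r 0 0)
      = max (max 0 ((ps u r 0).foldl max 0)) (Mne (ps (w :: v) r (shft u r 0)) - w) := by
  have hps : ps (u ++ 0 :: v) r 0 = ps u r 0 ++ (ps (w :: v) r (shft u r 0)).map (· + (-w)) := by
    rw [ps_append]
    congr 1
    have h1 : shft u r 0 + (0 - r) = shft u r 0 + (w - r) + (-w) := by ring
    simp only [ps, h1]
    rw [ps_shift]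
    simp
  rw [nfsLoopA_eq, hps, List.foldl_append]
  have hT : ps (w :: v) r (shft u r 0) = (shft u r 0 + (w - r)) :: ps v r (shft u r 0 + (w - r)) := rfl
  rw [hT]
  simp only [List.map_cons]
  rw [foldl_max_eq_Mne]
  have h2 : Mne ((shft u r 0 + (w - r) + -w) :: (ps v r (shft u r 0 + (w - r))).map (fun x => x + -w))
      = Mne ((shft u r 0 + (w - r)) :: ps v r (shft u r 0 + (w - r))) + -w := by
    simpa using Mne_map_add (shft u r 0 + (w - r)) (ps v r (shft u r 0 + (w - r))) (-w)
  rw [h2, max_assoc, ← hT]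
  have h3 : Mne (ps (w :: v) r (shft u r 0)) + -w = Mne (ps (w :: v) r (shft u r 0)) - w := by ring
  rw [h3]


theorem set_len_append (u : List Int) (x y : Int) (v : List Int) :
    (u ++ x :: v).set u.length y = u ++ y :: v := by
  induction u with
  | nil => rfl
  | cons a t ih => simp

theorem suffMax_getD (l : List Int) (i : Nat) (h : i < l.length) :
    ((prefMax l.reverse).reverse).getD i 0 = Mne (l.drop i) := by
  have hlen : (prefMax l.reverse).length = l.length := by
    rw [prefMax_length, List.length_reverse]
  have hi : i < (prefMax l.reverse).reverse.length := by simpa [hlen]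
  rw [List.getD_eq_getElem _ _ hi, List.getElem_reverse]
  have hj : l.length - 1 - i < l.reverse.length := by simp; omega
  have hj' : (prefMax l.reverse).length - 1 - i < (prefMax l.reverse).length := by omega
  rw [← List.getD_eq_getElem _ 0 hj', hlen, prefMax_getD l.reverse (l.length - 1 - i) (by simpa using hj)]
  have h1 : l.length - 1 - i + 1 = l.length - i := by omega
  rw [h1, List.take_reverse]
  have h2 : l.length - (l.length - i) = i := by omega
  rw [h2, Mne_reverse]
  intro hnil
  rw [List.drop_eq_nil_iff] at hnil
  omega

theorem pref_len (waves : List Int) (r : Int) : (scanSums waves r 0).length = waves.length + 1 := by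
  rw [scanSums_eq]; simp [ps_length]

theorem getD_len_append (u : List Int) (w : Int) (v : List Int) :
    (u ++ w :: v).getD u.length 0 = w := by
  induction u with
  | nil => rfl
  | cons a t ih => simp

theorem cand_getD (waves u : List Int) (w : Int) (v : List Int) (r : Int) (k : Nat)
    (hw : waves = u ++ w :: v) (hul : u.length = k) :
    max 0 (nfsLoopA (waves.set k 0) r 0 0)
      = max (max 0 ((prefMax (scanSums waves r 0)).getD k 0))
            (((prefMax (scanSums waves r 0).reverse).reverse).getD (k + 1) 0 - waves.getD k 0) := by
  subst hw
  subst hul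
  have hpsu : (ps u r 0).length = u.length := ps_length u r 0
  have hps2 : ps (u ++ w :: v) r 0 = ps u r 0 ++ ps (w :: v) r (shft u r 0) := ps_append u (w :: v) r 0
  have hlen : (u ++ w :: v).length = u.length + v.length + 1 := by simp; omega
  have hL : (prefMax (scanSums (u ++ w :: v) r 0)).getD u.length 0 = (ps u r 0).foldl max 0 := by
    rw [prefMax_getD _ u.length (by rw [pref_len, hlen]; omega), scanSums_eq, hps2,
      List.take_succ_cons, ← hpsu, List.take_left]
    rfl
  have hR : ((prefMax (scanSums (u ++ w :: v) r 0).reverse).reverse).getD (u.length + 1) 0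
      = Mne (ps (w :: v) r (shft u r 0)) := by
    rw [suffMax_getD _ (u.length + 1) (by rw [pref_len, hlen]; omega)]
    congr 1
    rw [scanSums_eq, hps2, List.drop_succ_cons, ← hpsu, List.drop_left]
  rw [set_len_append, hL, hR, getD_len_append, cand_eq u w v r]

theorem zip_eq (waves : List Int) (r : Int) :
    waves.zip ((prefMax (scanSums waves r 0)).zip (((prefMax (scanSums waves r 0).reverse).reverse).drop 1))
      = (List.range waves.length).map (fun k =>
          (waves.getD k 0, ((prefMax (scanSums waves r 0)).getD k 0,
            ((prefMax (scanSums waves r 0).reverse).reverse).getD (k + 1) 0))) := by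
  have hL : (prefMax (scanSums waves r 0)).length = waves.length + 1 := by
    rw [prefMax_length, pref_len]
  have hR2 : (prefMax (scanSums waves r 0).reverse).length = waves.length + 1 := by
    rw [prefMax_length, List.length_reverse, pref_len]
  have hRl : ((prefMax (scanSums waves r 0).reverse).reverse).length = waves.length + 1 := by
    rw [List.length_reverse, hR2]
  apply List.ext_getElem
  · simp [List.length_zip, hL, hR2]
  · intro i h1 h2
    have hi : i < waves.length := by
      simp [List.length_zip, hL, hR2] at h1
      omega
    have hiL : i < (prefMax (scanSums waves r 0)).length := by omega
    have hiR : i + 1 < ((prefMax (scanSums waves r 0).reverse).reverse).length := by omega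
    simp only [List.getElem_zip, List.getElem_map, List.getElem_range, List.getElem_drop]
    rw [List.getD_eq_getElem waves 0 hi, List.getD_eq_getElem _ 0 hiL, List.getD_eq_getElem _ 0 hiR]
    simp [Nat.add_comm]

-- ===== VERDICT (by name: the statement is the Claim_ definition above) =====
theorem compute_min_stamina_py_spec : Claim_equal_compute_min_stamina_py := by
  intro waves r sh _
  show compute_min_stamina_py waves r sh = compute_min_stamina_py_alt waves r sh
  simp only [compute_min_stamina_py, compute_min_stamina_py_alt, needForSequence]
  have hpref_ne : scanSums waves r 0 ≠ [] := by rw [scanSums_eq]; simp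
  have hbase : max 0 (nfsLoopA waves r 0 0) = max 0 ((prefMax (scanSums waves r 0)).getLastD 0) := by
    rw [nfsLoopA_eq, prefMax_getLastD _ hpref_ne, scanSums_eq]
    rfl
  by_cases hsh : sh ≤ 0
  · simp [hsh, hbase]
  · have hsh1 : sh ≥ 1 := by omega
    simp only [if_neg hsh, hsh1, if_pos, one_ne_zero, hbase]
    rw [zip_eq, PySem.List.pyRange_zero_natCast, List.foldl_map, List.foldl_map]
    apply PySem.List.foldl_congr_mem'
    intro k hkmem best
    have hk : k < waves.length := List.mem_range.mp hkmem
    simp only [PySem.List.pySetD_natCast]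
    have hw : waves = waves.take k ++ waves[k] :: waves.drop (k + 1) := by
      conv_lhs => rw [← List.take_append_drop k waves, List.drop_eq_getElem_cons hk]
    have hul : (waves.take k).length = k := by simp; omega
    rw [cand_getD waves (waves.take k) waves[k] (waves.drop (k + 1)) r k hw hul]
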